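-- pv_equiv track=rewrite | github.com/noah-chelednik/voynich-data | vcat/eva_charset.py | count_compound_glyphs
-- ===== SOURCE A (Python) =====
-- EVA_COMPOUNDS: set[str] = {
--     "ch",  # Very common, often word-initial
--     "sh",  # Common
--     "cth",  # Rare - gallows with pedestal
--     "ckh",  # Rare - gallows with pedestal
--     "cph",  # Rare - gallows with pedestal
--     "cfh",  # Rare - gallows with pedestal
-- }
--
-- def count_compound_glyphs(text: str) -> dict[str, int]:
--     """Count occurrences of compound glyphs in text.
--
--     Compound glyphs are multi-character sequences that represent
--     single glyphs in EVA (ch, sh, cth, ckh, cph, cfh).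
--
--     Args:
--         text: EVA transcription text.
--
--     Returns:
--         Dictionary mapping compound glyphs to their counts.
--         Only compounds that appear at least once are included.
--
--     Example:
--         >>> counts = count_compound_glyphs("chedy.qokedy.chol.shedy")
--         >>> counts.get('ch', 0)
--         2
--         >>> counts.get('sh', 0)
--         1
--         >>> 'cth' in counts
--         False
--     """
--     counts: dict[str, int] = {}
--     text_lower = text.lower()
--     for compound in EVA_COMPOUNDS:
--         count = text_lower.count(compound)
--         if count > 0:
--             counts[compound] = count
--     return counts
-- ===== SOURCE B (Python) =====
-- EVA_COMPOUNDS_ORDER = ("ch", "sh", "cth", "ckh", "cph", "cfh")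
--
--
-- def count_compound_glyphs(text: str) -> dict[str, int]:
--     """Single left-to-right pass: at each position of the lowered text, tally
--     every compound that starts there; keep only compounds with a positive tally."""
--     tally: dict[str, int] = {}
--     t = text.lower()
--     for i in range(len(t)):
--         for compound in EVA_COMPOUNDS_ORDER:
--             if t.startswith(compound, i):
--                 tally[compound] = tally.get(compound, 0) + 1
--     return {c: tally[c] for c in EVA_COMPOUNDS_ORDER if c in tally}
-- ===== Notes on version B (the rewrite author's own statement) =====
-- stated objective: alternative
-- what changed: Replaces six independent str.count scans of the whole text by a single indexed left-to-right pass over the lowered text that tallies every compound starting at each position in one dict, then keeps the positive tallies in compound order.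
import Mathlib
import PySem

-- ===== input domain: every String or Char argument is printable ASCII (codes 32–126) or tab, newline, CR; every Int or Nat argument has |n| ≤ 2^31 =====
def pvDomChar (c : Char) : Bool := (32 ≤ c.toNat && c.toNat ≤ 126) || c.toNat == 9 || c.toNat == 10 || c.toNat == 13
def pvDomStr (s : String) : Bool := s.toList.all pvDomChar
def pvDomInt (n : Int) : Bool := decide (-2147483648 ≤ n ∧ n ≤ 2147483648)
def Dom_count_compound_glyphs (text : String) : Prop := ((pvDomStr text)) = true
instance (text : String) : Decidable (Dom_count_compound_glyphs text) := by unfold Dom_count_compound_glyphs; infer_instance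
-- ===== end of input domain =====

-- B replaces A's six independent str.count scans by ONE left-to-right pass over the lowered
-- text that tallies every compound starting at each position (objective: alternative).
-- Both Pythons return a dict; the association lists here carry its insertion order — dict
-- outputs are compared as dicts (order-insensitively) against Python.

-- ===== PORT A =====
-- EVA_COMPOUNDS is a Python set only iterated to build a dict looked up afterwards, so the
-- result does not depend on its hash order; we fix the literal order of the source.
def evaCompounds : List String := ["ch", "sh", "cth", "ckh", "cph", "cfh"]

def count_compound_glyphs (text : String) : List (String × Int) :=
  let text_lower := PySem.Str.lower text
  (evaCompounds.foldl
    (fun counts compound =>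
      let count : Int := (PySem.Str.count text_lower compound : Int)
      if count > 0 then counts.insert compound count else counts)
    (PySem.Dict.empty : PySem.Dict String Int)).items

-- ===== PORT B =====
-- Source B's EVA_COMPOUNDS_ORDER tuple
def evaCompoundsOrder : List String := ["ch", "sh", "cth", "ckh", "cph", "cfh"]

-- B-side helper: the body of Source B's "for i in range(len(t))" loop (the inner "for compound" loop)
def altStep (t : List Char) (tally : PySem.Dict String Int) (i : Int) : PySem.Dict String Int :=
  evaCompoundsOrder.foldl
    (fun tally compound =>
      -- t.startswith(compound, i): hand port, exact for 0 ≤ i (prefix test on the i-suffix)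
      if compound.toList.isPrefixOf (t.drop i.toNat) then
        tally.insert compound (tally.getD compound 0 + 1)
      else tally)
    tally

def count_compound_glyphs_alt (text : String) : List (String × Int) :=
  let t := (PySem.Str.lower text).toList
  let tally := (PySem.List.pyRange 0 t.length 1).foldl (altStep t) PySem.Dict.empty
  -- {c: tally[c] for c in EVA_COMPOUNDS_ORDER if c in tally} (tally[c] exact: guarded by 'c in tally')
  (evaCompoundsOrder.foldl
    (fun r c => if tally.contains c then r.insert c (tally.getD c 0) else r)
    (PySem.Dict.empty : PySem.Dict String Int)).items

-- ===== PRECONDITION & SPEC =====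
def Spec_count_compound_glyphs (text : String) (out : List (String × Int)) : Prop := out = count_compound_glyphs_alt text
instance (text : String) (out : List (String × Int)) : Decidable (Spec_count_compound_glyphs text out) := by unfold Spec_count_compound_glyphs; infer_instance

-- ===== CLAIM (what is proved, stated in full; the proofs are below) =====
def Claim_equal_count_compound_glyphs : Prop := ∀ (text : String), Dom_count_compound_glyphs text → Spec_count_compound_glyphs text (count_compound_glyphs text)

-- ===== LEMMAS AND PROOFS =====

-- number of positions of l at which p starts (overlap-tolerant occurrence count)
def occR (p : List Char) : List Char → Nat
  | [] => 0
  | x :: rest => (if p.isPrefixOf (x :: rest) then 1 else 0) + occR p rest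

-- p has no nonempty proper border (no proper suffix of p is a prefix of p)
def borderFree (p : List Char) : Prop := ∀ k < p.length, 0 < k → ¬ (p.drop k <+: p)

theorem no_overlap {p l : List Char} (hbf : borderFree p) (h : p.isPrefixOf l)
    {k : Nat} (hk0 : 0 < k) (hkp : k < p.length) : ¬ p.isPrefixOf (l.drop k) := by
  rw [List.isPrefixOf_iff_prefix] at h ⊢
  intro h2
  obtain ⟨l', rfl⟩ := h
  rw [List.drop_append_of_le_length (le_of_lt hkp)] at h2
  apply hbf k hkp hk0
  have h3 := List.prefix_iff_eq_take.mp h2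
  rw [List.take_append, List.take_of_length_le (by simp)] at h3
  exact ⟨_, h3.symm⟩

theorem occR_no_hits (p : List Char) : ∀ (j : Nat) (l : List Char),
    (∀ i < j, ¬ p.isPrefixOf (l.drop i)) → occR p l = occR p (l.drop j) := by
  intro j
  induction j with
  | zero => simp
  | succ j ih =>
    intro l h
    cases l with
    | nil => simp [List.drop_nil]
    | cons x rest =>
      have h0 : ¬ p.isPrefixOf (x :: rest) := by simpa using h 0 (Nat.succ_pos j)
      have : occR p (x :: rest) = occR p rest := by simp [occR, h0]
      rw [this]
      have := ih rest (fun i hi => by simpa [List.drop] using h (i + 1) (by omega))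
      simpa [List.drop] using this

theorem occR_match {p l : List Char} (hbf : borderFree p) (hne : p ≠ [])
    (h : p.isPrefixOf l) : occR p l = 1 + occR p (l.drop p.length) := by
  cases l with
  | nil =>
    cases p with
    | nil => exact absurd rfl hne
    | cons a q => simp [List.isPrefixOf] at h
  | cons x rest =>
    have h1 : occR p (x :: rest) = 1 + occR p rest := by simp [occR, h]
    rw [h1]
    have h2 : occR p rest = occR p (rest.drop (p.length - 1)) := by
      apply occR_no_hits
      intro i hi
      have : rest.drop i = (x :: rest).drop (i + 1) := by simp
      rw [this]
      exact no_overlap hbf h (by omega) (by omega)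
    rw [h2]
    congr 1
    have hp1 : 1 ≤ p.length := by
      cases p with
      | nil => exact absurd rfl hne
      | cons => simp
    have : (x :: rest).drop p.length = rest.drop (p.length - 1) := by
      cases hp : p.length with
      | zero => omega
      | succ m => simp
    rw [this]

theorem count_go_eq (p : List Char) (hbf : borderFree p) (hne : p ≠ []) :
    ∀ (fuel : Nat) (l : List Char) (acc : Nat), l.length ≤ fuel →
      PySem.Chars.count.go p fuel l acc = acc + occR p l := by
  intro fuel
  induction fuel with
  | zero =>
    intro l acc hl
    have : l = [] := by cases l <;> simp_all
    subst this
    rw [PySem.Chars.count.go]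
    simp [occR]
  | succ fuel ih =>
    intro l acc hl
    cases l with
    | nil => rw [PySem.Chars.count.go]; simp [occR]; omega
    | cons x rest =>
      have hp1 : 1 ≤ p.length := by cases p with | nil => exact absurd rfl hne | cons => simp
      rw [PySem.Chars.count.go]
      by_cases h : p.isPrefixOf (x :: rest) = true
      · rw [if_pos h, ih _ _ (by simp [List.length_drop] at hl ⊢; omega)]
        rw [occR_match hbf hne h]
        omega
      · rw [if_neg h, ih _ _ (by simp at hl; omega)]
        simp [occR, h]

theorem count_eq_occR (p l : List Char) (hbf : borderFree p) (hne : p ≠ []) :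
    PySem.Chars.count l p = occR p l := by
  rw [PySem.Chars.count]
  have : p.isEmpty = false := by cases p <;> simp_all
  rw [this]
  simp only [Bool.false_eq_true, if_false]
  simpa using count_go_eq p hbf hne l.length l 0 le_rfl

-- inner fold over a Nodup key list with a conditional increment: effect on getD
theorem foldl_condInc_getD (xs : List String) (P : String → Bool)
    (d : PySem.Dict String Int) (c : String) (hnd : xs.Nodup) :
    (xs.foldl (fun d' c' => if P c' then d'.insert c' (d'.getD c' 0 + 1) else d') d).getD c 0
      = d.getD c 0 + (if c ∈ xs ∧ P c then 1 else 0) := by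
  induction xs generalizing d with
  | nil => simp
  | cons x xs ih =>
    have hx : x ∉ xs := (List.nodup_cons.mp hnd).1
    rw [List.foldl_cons, ih _ (List.nodup_cons.mp hnd).2]
    by_cases hPx : P x
    · simp only [hPx, if_true]
      by_cases hcx : c = x
      · subst hcx
        rw [PySem.Dict.getD_insert_self]
        simp [hx, hPx]
      · rw [PySem.Dict.getD_insert_of_ne _ _ _ hcx]
        simp [hcx]
    · simp only [hPx, Bool.false_eq_true, if_false]
      by_cases hcx : c = x
      · subst hcx; simp [hPx]
      · simp [hcx]

-- inner fold: effect on contains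
theorem foldl_condInc_contains (xs : List String) (P : String → Bool)
    (d : PySem.Dict String Int) (c : String) :
    (xs.foldl (fun d' c' => if P c' then d'.insert c' (d'.getD c' 0 + 1) else d') d).contains c
      = (d.contains c || decide (c ∈ xs ∧ P c)) := by
  induction xs generalizing d with
  | nil => simp
  | cons x xs ih =>
    rw [List.foldl_cons, ih]
    by_cases hPx : P x
    · simp only [hPx, if_true]
      rw [PySem.Dict.contains_insert]
      by_cases hcx : c = x
      · subst hcx; simp [hPx]
      · have hb : (c == x) = false := by simp [hcx]
        simp [hb, hcx]
    · simp only [hPx, Bool.false_eq_true, if_false]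
      by_cases hcx : c = x
      · subst hcx; simp [hPx]
      · simp [hcx]

theorem evaOrder_eq : evaCompoundsOrder = evaCompounds := rfl

theorem evaCompoundsOrder_nodup : evaCompoundsOrder.Nodup := by decide

-- B's tally loop run over the first k positions
def rangeTally (t : List Char) (k : Nat) (d : PySem.Dict String Int) : PySem.Dict String Int :=
  (PySem.List.pyRange 0 (k : Int) 1).foldl (altStep t) d

theorem rangeTally_succ (t : List Char) (k : Nat) (d : PySem.Dict String Int) :
    rangeTally t (k + 1) d = altStep t (rangeTally t k d) (k : Int) := by
  unfold rangeTally
  push_cast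
  rw [PySem.List.pyRange_one_append 0 (k : Int) ((k : Int) + 1) (by omega) (by omega),
    List.foldl_append]
  rw [show PySem.List.pyRange (k : Int) ((k : Int) + 1) = [(k : Int)] from by
    rw [PySem.List.pyRange_one_cons (a := (k : Int)) (b := (k : Int) + 1) (by omega)]
    simp [PySem.List.pyRange]]
  simp only [List.foldl_cons, List.foldl_nil]

-- number of positions j < k of t at which p starts
def hits (p t : List Char) (k : Nat) : Nat :=
  (List.range k).countP (fun j => p.isPrefixOf (t.drop j))

theorem hits_succ (p t : List Char) (k : Nat) :
    hits p t (k + 1) = hits p t k + (if p.isPrefixOf (t.drop k) then 1 else 0) := by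
  unfold hits
  rw [List.range_succ, List.countP_append]
  by_cases h : p.isPrefixOf (t.drop k) <;> simp [h]

theorem rangeTally_getD (t : List Char) (k : Nat) (d : PySem.Dict String Int) (c : String)
    (hc : c ∈ evaCompoundsOrder) :
    (rangeTally t k d).getD c 0 = d.getD c 0 + (hits c.toList t k : Int) := by
  induction k with
  | zero => simp [rangeTally, hits, PySem.List.pyRange]
  | succ k ih =>
    rw [rangeTally_succ]
    unfold altStep
    rw [foldl_condInc_getD _ _ _ _ evaCompoundsOrder_nodup, ih, hits_succ]
    simp only [hc, true_and, Int.toNat_natCast]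
    by_cases h : c.toList.isPrefixOf (t.drop k) <;> (simp [h]; try ring)

theorem rangeTally_contains (t : List Char) (k : Nat) (d : PySem.Dict String Int) (c : String)
    (hc : c ∈ evaCompoundsOrder) :
    (rangeTally t k d).contains c = (d.contains c || decide (0 < hits c.toList t k)) := by
  induction k with
  | zero => simp [rangeTally, hits, PySem.List.pyRange]
  | succ k ih =>
    rw [rangeTally_succ]
    unfold altStep
    rw [foldl_condInc_contains, ih, hits_succ]
    simp only [hc, true_and, Int.toNat_natCast]
    by_cases h : c.toList.isPrefixOf (t.drop k) <;>
      by_cases h0 : 0 < hits c.toList t k <;> simp [h, h0]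

theorem occR_eq_hits (p t : List Char) : occR p t = hits p t t.length := by
  induction t with
  | nil => simp [occR, hits]
  | cons x rest ih =>
    rw [occR, ih]
    unfold hits
    rw [List.length_cons, List.range_succ_eq_map, List.countP_cons, List.countP_map]
    simp only [Function.comp_def, Nat.succ_eq_add_one, List.drop_succ_cons, List.drop_zero]
    by_cases h : p.isPrefixOf (x :: rest) <;> (simp [h]; try omega)

theorem compounds_borderFree : ∀ c ∈ evaCompounds, borderFree c.toList ∧ c.toList ≠ [] := by
  intro c hc
  fin_cases hc <;> exact ⟨by unfold borderFree; decide, by decide⟩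

-- ===== VERDICT (by name: the statement is the Claim_ definition above) =====
set_option maxHeartbeats 1000000 in
theorem count_compound_glyphs_spec : Claim_equal_count_compound_glyphs := by
  intro text _
  unfold Spec_count_compound_glyphs
  simp only [count_compound_glyphs, count_compound_glyphs_alt]
  rw [show (PySem.List.pyRange 0 ((PySem.Str.lower text).toList.length : Int) 1).foldl
        (altStep (PySem.Str.lower text).toList) PySem.Dict.empty
      = rangeTally (PySem.Str.lower text).toList (PySem.Str.lower text).toList.length
          PySem.Dict.empty
      from rfl]
  refine congrArg PySem.Dict.items ?_
  rw [evaOrder_eq]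
  refine PySem.List.foldl_congr_mem _ _ _ _ ?_
  intro acc c hc
  have hc' : c ∈ evaCompoundsOrder := evaOrder_eq ▸ hc
  obtain ⟨hbf, hne⟩ := compounds_borderFree c hc
  rw [PySem.Str.count_eq, count_eq_occR _ _ hbf hne]
  rw [rangeTally_getD _ _ _ _ hc', rangeTally_contains _ _ _ _ hc', ← occR_eq_hits]
  simp only [PySem.Dict.getD_empty, PySem.Dict.contains_empty, Bool.false_or, zero_add]
  refine if_congr ?_ rfl rfl
  simp [Int.natCast_pos]
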